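-- pv_equiv track=rewrite | github.com/iamevn/advent-of-code-solutions | 2017/09/09.py | scoregroups
-- ===== SOURCE A (Python) =====
-- def filtergarbage(stream):
--     output = ""
--     escaped = False
--     commented = False
--     cancelled = 0
--     for c in stream:
--         if escaped:
--             escaped = False
--         elif not commented:
--             if c == '<':
--                 commented = True
--             else:
--                 output += c
--         elif commented:
--             if escaped:
--                 pass
--             elif c == '>':
--                 commented = False
--             elif c == '!':
--                 escaped = True
--             else:
--                 cancelled += 1
--     return (output, cancelled)
--
-- def scoregroups(stream):
--     stream = filtergarbage(stream)[0]
--     sum = 0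
--     depth = 0
--     for c in stream:
--         if c == '{':
--             depth += 1
--             sum += depth
--         elif c == '}':
--             depth -= 1
--     return sum
-- ===== SOURCE B (Python) =====
-- def scoregroups(stream):
--     commented = False
--     escaped = False
--     depth = 0
--     total = 0
--     for c in stream:
--         if escaped:
--             escaped = False
--         elif not commented:
--             if c == '<':
--                 commented = True
--             elif c == '{':
--                 depth += 1
--                 total += depth
--             elif c == '}':
--                 depth -= 1
--         elif c == '>':
--             commented = False
--         elif c == '!':
--             escaped = True
--     return total
-- ===== Notes on version B (the rewrite author's own statement) =====
-- stated objective: simpler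
-- what changed: Fuses A's two passes (build a garbage-free string, then score it) into one streaming pass that keeps only booleans and two counters, building no intermediate string and dropping the unused cancelled count.
import Mathlib
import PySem

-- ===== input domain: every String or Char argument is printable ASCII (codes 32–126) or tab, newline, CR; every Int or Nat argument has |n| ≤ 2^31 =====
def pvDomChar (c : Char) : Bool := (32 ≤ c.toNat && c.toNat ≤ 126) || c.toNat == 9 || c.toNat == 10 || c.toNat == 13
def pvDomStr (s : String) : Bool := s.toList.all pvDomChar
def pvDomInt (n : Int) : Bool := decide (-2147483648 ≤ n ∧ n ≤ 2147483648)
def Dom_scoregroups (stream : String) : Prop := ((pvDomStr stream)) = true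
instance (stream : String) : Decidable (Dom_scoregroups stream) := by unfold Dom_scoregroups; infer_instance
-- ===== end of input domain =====

-- B fuses A's filter-then-score two-pass into one streaming pass with O(1) state (simpler; no intermediate string).

-- ===== PORT A =====
-- state: (output, escaped, commented, cancelled)
def pvStepA (s : List Char × Bool × Bool × Int) (c : Char) : List Char × Bool × Bool × Int :=
  match s with
  | (out, esc, com, can) =>
    if esc then (out, false, com, can)
    else if !com then
      (if c = '<' then (out, esc, true, can) else (out ++ [c], esc, com, can))
    else  -- commented
      if esc then (out, esc, com, can)        -- dead 'if escaped: pass' branch kept for fidelity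
      else if c = '>' then (out, esc, false, can)
      else if c = '!' then (out, true, com, can)
      else (out, esc, com, can + 1)

def pvFilterGarbage (stream : String) : List Char × Int :=
  let r := stream.toList.foldl pvStepA ([], false, false, 0)
  (r.1, r.2.2.2)

-- state: (sum, depth)
def pvScoreStep (p : Int × Int) (c : Char) : Int × Int :=
  if c = '{' then (p.1 + (p.2 + 1), p.2 + 1)
  else if c = '}' then (p.1, p.2 - 1)
  else p

def scoregroups (stream : String) : Int :=
  let s := (pvFilterGarbage stream).1
  (s.foldl pvScoreStep (0, 0)).1

-- ===== PORT B =====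
-- state: (commented, escaped, depth, total)
def pvStepB (s : Bool × Bool × Int × Int) (c : Char) : Bool × Bool × Int × Int :=
  match s with
  | (com, esc, depth, total) =>
    if esc then (com, false, depth, total)
    else if !com then
      if c = '<' then (true, esc, depth, total)
      else if c = '{' then (com, esc, depth + 1, total + (depth + 1))
      else if c = '}' then (com, esc, depth - 1, total)
      else (com, esc, depth, total)
    else if c = '>' then (false, esc, depth, total)
    else if c = '!' then (com, true, depth, total)
    else (com, esc, depth, total)

def scoregroups_alt (stream : String) : Int :=
  (stream.toList.foldl pvStepB (false, false, 0, 0)).2.2.2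

-- ===== PRECONDITION & SPEC =====
def Spec_scoregroups (stream : String) (out : Int) : Prop := out = scoregroups_alt stream
instance (stream : String) (out : Int) : Decidable (Spec_scoregroups stream out) := by unfold Spec_scoregroups; infer_instance

-- ===== CLAIM (what is proved, stated in full; the proofs are below) =====
def Claim_equal_scoregroups : Prop := ∀ (stream : String), Dom_scoregroups stream → Spec_scoregroups stream (scoregroups stream)

-- ===== LEMMAS AND PROOFS =====

-- A's output accumulator only ever grows by appending: factor it out.
theorem pvStepA_out_append (cs : List Char) (out : List Char) (esc com : Bool) (can : Int) :
    (cs.foldl pvStepA (out, esc, com, can)).1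
      = out ++ (cs.foldl pvStepA ([], esc, com, can)).1 := by
  induction cs generalizing out esc com can with
  | nil => simp [List.foldl]
  | cons c cs ih =>
    simp only [List.foldl, pvStepA]
    split_ifs with h1 h2 h3 h4 h5
    · exact ih out false com can
    · exact ih out esc true can
    · rw [ih (out ++ [c]) esc com can]
      simp only [List.nil_append]
      rw [ih [c] esc com can, List.append_assoc]
    · exact ih out esc false can
    · exact ih out true com can
    · exact ih out esc com (can + 1)

-- Main invariant: scoring the filtered remainder from state (sum, depth) equals B's fused fold.
theorem pvFused (cs : List Char) (esc com : Bool) (can sum depth : Int) :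
    (((cs.foldl pvStepA ([], esc, com, can)).1).foldl pvScoreStep (sum, depth)).1
      = (cs.foldl pvStepB (com, esc, depth, sum)).2.2.2 := by
  induction cs generalizing esc com can sum depth with
  | nil => simp [List.foldl]
  | cons c cs ih =>
    cases esc with
    | true =>
      simp only [List.foldl]
      rw [show pvStepA ([], true, com, can) c = ([], false, com, can) from by simp [pvStepA],
          show pvStepB (com, true, depth, sum) c = (com, false, depth, sum) from by simp [pvStepB]]
      exact ih false com can sum depth
    | false =>
      cases com with
      | false =>
        by_cases hl : c = '<'
        · simp only [List.foldl]
          rw [show pvStepA ([], false, false, can) c = ([], false, true, can) from by simp [pvStepA, hl],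
              show pvStepB (false, false, depth, sum) c = (true, false, depth, sum) from by simp [pvStepB, hl]]
          exact ih false true can sum depth
        · simp only [List.foldl]
          rw [show pvStepA ([], false, false, can) c = ([c], false, false, can) from by simp [pvStepA, hl]]
          rw [pvStepA_out_append cs [c] false false can]
          simp only [List.cons_append, List.nil_append, List.foldl]
          by_cases hb : c = '{'
          · rw [show pvScoreStep (sum, depth) c = (sum + (depth + 1), depth + 1) from by simp [pvScoreStep, hb],
                show pvStepB (false, false, depth, sum) c = (false, false, depth + 1, sum + (depth + 1)) from by simp [pvStepB, hb]]
            exact ih false false can (sum + (depth + 1)) (depth + 1)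
          · by_cases hc : c = '}'
            · rw [show pvScoreStep (sum, depth) c = (sum, depth - 1) from by simp [pvScoreStep, hc],
                  show pvStepB (false, false, depth, sum) c = (false, false, depth - 1, sum) from by simp [pvStepB, hc]]
              exact ih false false can sum (depth - 1)
            · rw [show pvScoreStep (sum, depth) c = (sum, depth) from by simp [pvScoreStep, hb, hc],
                  show pvStepB (false, false, depth, sum) c = (false, false, depth, sum) from by simp [pvStepB, hl, hb, hc]]
              exact ih false false can sum depth
      | true =>
        simp only [List.foldl]
        by_cases hg : c = '>'
        · rw [show pvStepA ([], false, true, can) c = ([], false, false, can) from by simp [pvStepA, hg],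
              show pvStepB (true, false, depth, sum) c = (false, false, depth, sum) from by simp [pvStepB, hg]]
          exact ih false false can sum depth
        · by_cases he : c = '!'
          · rw [show pvStepA ([], false, true, can) c = ([], true, true, can) from by simp [pvStepA, he],
                show pvStepB (true, false, depth, sum) c = (true, true, depth, sum) from by simp [pvStepB, he]]
            exact ih true true can sum depth
          · rw [show pvStepA ([], false, true, can) c = ([], false, true, can + 1) from by simp [pvStepA, hg, he],
                show pvStepB (true, false, depth, sum) c = (true, false, depth, sum) from by simp [pvStepB, hg, he]]
            exact ih false true (can + 1) sum depth

-- ===== VERDICT (by name: the statement is the Claim_ definition above) =====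
theorem scoregroups_spec : Claim_equal_scoregroups := by
  intro stream _
  unfold Spec_scoregroups scoregroups scoregroups_alt pvFilterGarbage
  exact pvFused stream.toList false false 0 0 0
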